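-- pv_equiv track=rewrite | github.com/0LinaSt0/Python_bootcamp | 01/ex01/ex01.py | gold_for_every_gentlemen
-- ===== SOURCE A (Python) =====
-- def gold_for_every_gentlemen(gold_count):
--     equally_gold = gold_count // 3
--     remainder = gold_count - (equally_gold * 3)
--     gold_g0 = gold_g1 = gold_g2 = equally_gold
--
--     while remainder:
--         if remainder:
--             gold_g0 += 1
--             remainder -= 1
--         else:
--             break
--         if remainder:
--             gold_g1 += 1
--             remainder -= 1
--         else:
--             break
--         if remainder:
--             gold_g2 += 1
--             remainder -= 1
--         else:
--             break
--
--     return (gold_g0, gold_g1, gold_g2)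
-- ===== SOURCE B (Python) =====
-- def gold_for_every_gentlemen(gold_count):
--     return ((gold_count + 2) // 3, (gold_count + 1) // 3, gold_count // 3)
-- ===== Notes on version B (the rewrite author's own statement) =====
-- stated objective: simpler
-- what changed: Replaces the remainder-distributing while loop and mutable accumulators with a single closed-form return of three shifted floor divisions.
import Mathlib
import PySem

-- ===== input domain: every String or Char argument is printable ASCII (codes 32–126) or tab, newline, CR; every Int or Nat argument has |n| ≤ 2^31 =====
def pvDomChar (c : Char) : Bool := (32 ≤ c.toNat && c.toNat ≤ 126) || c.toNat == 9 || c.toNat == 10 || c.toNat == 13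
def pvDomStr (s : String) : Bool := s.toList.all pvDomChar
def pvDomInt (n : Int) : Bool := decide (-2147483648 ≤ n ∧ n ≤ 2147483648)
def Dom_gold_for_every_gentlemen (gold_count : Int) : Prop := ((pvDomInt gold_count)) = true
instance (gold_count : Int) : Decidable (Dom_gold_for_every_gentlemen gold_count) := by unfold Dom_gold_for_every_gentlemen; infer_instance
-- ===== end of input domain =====

-- B replaces A's remainder-distributing while loop with one closed-form return of three floor divisions (objective: simpler).

-- ===== PORT A =====
-- A's while loop; the fuel argument is only a totality guard (remainder starts in [0,3) so fuel = remainder.toNat + 1 suffices)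
def goldLoop (fuel : Nat) (g0 g1 g2 rem : Int) : Int × Int × Int :=
  match fuel with
  | 0 => (g0, g1, g2)
  | fuel + 1 =>
    if rem ≠ 0 then
      -- gold_g0 += 1; remainder -= 1
      let g0 := g0 + 1
      let rem := rem - 1
      if rem ≠ 0 then
        -- gold_g1 += 1; remainder -= 1
        let g1 := g1 + 1
        let rem := rem - 1
        if rem ≠ 0 then
          -- gold_g2 += 1; remainder -= 1
          let g2 := g2 + 1
          let rem := rem - 1
          goldLoop fuel g0 g1 g2 rem
        else (g0, g1, g2)
      else (g0, g1, g2)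
    else (g0, g1, g2)

def gold_for_every_gentlemen (gold_count : Int) : Int × Int × Int :=
  let equally_gold := PySem.Int.floordiv gold_count 3
  let remainder := gold_count - equally_gold * 3
  goldLoop (remainder.toNat + 1) equally_gold equally_gold equally_gold remainder

-- ===== PORT B =====
def gold_for_every_gentlemen_alt (gold_count : Int) : Int × Int × Int :=
  (PySem.Int.floordiv (gold_count + 2) 3,
   PySem.Int.floordiv (gold_count + 1) 3,
   PySem.Int.floordiv gold_count 3)

-- ===== PRECONDITION & SPEC =====
def Spec_gold_for_every_gentlemen (gold_count : Int) (out : Int × Int × Int) : Prop := out = gold_for_every_gentlemen_alt gold_count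
instance (gold_count : Int) (out : Int × Int × Int) : Decidable (Spec_gold_for_every_gentlemen gold_count out) := by unfold Spec_gold_for_every_gentlemen; infer_instance

-- ===== CLAIM (what is proved, stated in full; the proofs are below) =====
def Claim_equal_gold_for_every_gentlemen : Prop := ∀ (gold_count : Int), Dom_gold_for_every_gentlemen gold_count → Spec_gold_for_every_gentlemen gold_count (gold_for_every_gentlemen gold_count)

-- ===== LEMMAS AND PROOFS =====
-- ===== VERDICT (by name: the statement is the Claim_ definition above) =====
theorem gold_for_every_gentlemen_spec : Claim_equal_gold_for_every_gentlemen := by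
  intro g _
  unfold Spec_gold_for_every_gentlemen gold_for_every_gentlemen gold_for_every_gentlemen_alt
  have hq := PySem.Int.floordiv_mul_add_mod g 3
  have h0 := PySem.Int.mod_nonneg g (b := 3) (by norm_num)
  have h3 := PySem.Int.mod_lt g (b := 3) (by norm_num)
  set e := PySem.Int.floordiv g 3 with he
  set r := PySem.Int.mod g 3 with hr
  have hrem : g - e * 3 = r := by omega
  simp only []
  rw [show g - e * 3 = r from hrem]
  interval_cases r
  · simp [goldLoop, Prod.ext_iff]; omega
  · simp [goldLoop, Prod.ext_iff]; omega
  · simp [goldLoop, Prod.ext_iff]; omega
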